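-- pv_equiv track=rewrite | github.com/ianlintner/python_dsa | src/interview_workbook/strings/z_algorithm.py | string_periods
-- ===== SOURCE A (Python) =====
-- def z_array(s: str) -> list[int]:
--     """
--     Compute Z-array for string s.
--     Z[i] = length of the longest substring starting at i which is also a prefix of s.
--
--     Time: O(n)
--     Space: O(n)
--
--     Insight:
--     - Maintain a window [L, R] which is the rightmost segment matched with prefix.
--     - Reuse previous computations within [L, R] to avoid re-comparing.
--     """
--     n = len(s)
--     if n == 0:
--         return []
--     Z = [0] * n
--     L = R = 0
--     for i in range(1, n):
--         if i <= R:
--             # i is within [L, R], mirror = i - L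
--             Z[i] = min(R - i + 1, Z[i - L])
--         # Try to extend Z[i]
--         while i + Z[i] < n and s[Z[i]] == s[i + Z[i]]:
--             Z[i] += 1
--         # Update [L, R] if extended past R
--         if i + Z[i] - 1 > R:
--             L, R = i, i + Z[i] - 1
--     Z[0] = n
--     return Z
--
-- def string_periods(s: str) -> list[int]:
--     """
--     Return all periods p of the string such that s[i] == s[i+p] for all valid i.
--     Period p means the string is constructed by repeating a substring of length p.
--     Uses Z-array properties: if n % p == 0 and Z[p] >= n - p then p is a period.
--
--     Time: O(n)
--     """
--     n = len(s)
--     if n == 0: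
--         return []
--     Z = z_array(s)
--     periods = []
--     for p in range(1, n):
--         if n % p == 0 and Z[p] >= n - p:
--             periods.append(p)
--     return periods
-- ===== SOURCE B (Python) =====
-- def string_periods(s: str) -> list[int]:
--     n = len(s)
--     return [p for p in range(1, n) if n % p == 0 and s[:p] * (n // p) == s]
-- ===== Notes on version B (the rewrite author's own statement) =====
-- stated objective: simpler
-- what changed: B drops the Z-array entirely and tests each divisor length p directly by checking whether the prefix s[:p] repeated n//p times reconstructs s, in one comprehension; a timing run measured it faster since the equality test short-circuits at the first mismatch while A always builds the full Z-array, though B's worst case O(n*d(n)) is asymptotically larger.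
import Mathlib
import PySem

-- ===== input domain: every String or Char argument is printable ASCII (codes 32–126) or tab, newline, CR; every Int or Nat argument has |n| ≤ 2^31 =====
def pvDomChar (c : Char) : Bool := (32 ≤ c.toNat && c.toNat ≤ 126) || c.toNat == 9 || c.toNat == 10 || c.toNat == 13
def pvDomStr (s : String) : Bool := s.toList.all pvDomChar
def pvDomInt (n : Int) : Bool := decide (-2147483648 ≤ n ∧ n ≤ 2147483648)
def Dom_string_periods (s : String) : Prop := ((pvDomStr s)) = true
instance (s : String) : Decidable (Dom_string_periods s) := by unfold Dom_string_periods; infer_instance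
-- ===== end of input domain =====

-- B drops A's Z-array and instead tests each candidate length p directly, checking whether the
-- length-p prefix repeated n/p times rebuilds the string (objective: simpler; equal outputs proved below).

-- ===== PORT A =====
-- the while loop `while i + Z[i] < n and s[Z[i]] == s[i + Z[i]]: Z[i] += 1` of z_array
def zExtend (l : List Char) (i z : Nat) : Nat :=
  if h : i + z < l.length ∧ l.getD z ' ' = l.getD (i + z) ' ' then
    zExtend l i (z + 1)
  else z
termination_by l.length - (i + z)
decreasing_by omega

-- one iteration of z_array's for-loop; state = (Z, L, R)
def zStep (l : List Char) (st : List Nat × Nat × Nat) (i : Nat) : List Nat × Nat × Nat :=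
  let z0 := if i ≤ st.2.2 then min (st.2.2 - i + 1) (st.1.getD (i - st.2.1) 0) else st.1.getD i 0
  let z := zExtend l i z0
  if i + z - 1 > st.2.2 then (st.1.set i z, i, i + z - 1) else (st.1.set i z, st.2.1, st.2.2)

-- literal port of z_array
def zArrayA (s : String) : List Int :=
  let l := s.toList
  let n := l.length
  if n = 0 then []
  else
    let st := (List.range' 1 (n - 1)).foldl (zStep l) (List.replicate n 0, 0, 0)
    (st.1.set 0 n).map (fun z => Int.ofNat z)

def string_periods (s : String) : List Int :=
  let n := s.toList.length
  if n = 0 then []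
  else
    let Z := zArrayA s
    (List.range' 1 (n - 1)).foldl
      (fun acc p => if n % p = 0 ∧ (n : Int) - (p : Int) ≤ Z.getD p 0 then acc ++ [Int.ofNat p] else acc) []

-- ===== PORT B =====
-- s[:p] * k
def powList (t : List Char) : Nat → List Char
  | 0 => []
  | k + 1 => t ++ powList t k

def string_periods_alt (s : String) : List Int :=
  let l := s.toList
  let n := l.length
  ((List.range' 1 (n - 1)).filter
      (fun p => n % p == 0 && powList (l.take p) (n / p) == l)).map (fun p => Int.ofNat p)

-- ===== PRECONDITION & SPEC =====
def Spec_string_periods (s : String) (out : List Int) : Prop := out = string_periods_alt s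
instance (s : String) (out : List Int) : Decidable (Spec_string_periods s out) := by unfold Spec_string_periods; infer_instance

-- ===== CLAIM (what is proved, stated in full; the proofs are below) =====
def Claim_equal_string_periods : Prop := ∀ (s : String), Dom_string_periods s → Spec_string_periods s (string_periods s)

-- ===== LEMMAS AND PROOFS =====

-- longest common prefix length; zf l i is the true Z-value at position i
def lcpLen : List Char → List Char → Nat
  | a :: as, b :: bs => if a = b then lcpLen as bs + 1 else 0
  | _, _ => 0

def zf (l : List Char) (i : Nat) : Nat := lcpLen l (l.drop i)

theorem lcpLen_cons_eq (x : Char) (as bs : List Char) :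
    lcpLen (x :: as) (x :: bs) = lcpLen as bs + 1 := by simp [lcpLen]

theorem lcpLen_cons_ne (x y : Char) (as bs : List Char) (h : x ≠ y) :
    lcpLen (x :: as) (y :: bs) = 0 := by simp [lcpLen, h]

theorem lcp_ge_iff (m : Nat) : ∀ (a b : List Char),
    (m ≤ lcpLen a b ↔ m ≤ a.length ∧ m ≤ b.length ∧ a.take m = b.take m) := by
  induction m with
  | zero => intro a b; simp
  | succ m ih =>
    intro a b
    cases a with
    | nil => simp [lcpLen]
    | cons x as =>
      cases b with
      | nil => simp [lcpLen]
      | cons y bs =>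
        by_cases hxy : x = y
        · subst hxy
          rw [lcpLen_cons_eq]
          simp only [List.length_cons, List.take_succ_cons, List.cons.injEq, true_and]
          constructor
          · intro h
            have := (ih as bs).mp (by omega)
            exact ⟨by omega, by omega, this.2.2⟩
          · intro ⟨h1, h2, h3⟩
            have := (ih as bs).mpr ⟨by omega, by omega, h3⟩
            omega
        · rw [lcpLen_cons_ne x y as bs hxy]
          simp only [List.take_succ_cons, List.cons.injEq]
          constructor
          · omega
          · intro ⟨_, _, h3, _⟩; exact absurd h3 hxy

theorem zf_le (l : List Char) (i : Nat) : zf l i ≤ l.length - i := by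
  have h := (lcp_ge_iff (lcpLen l (l.drop i)) l (l.drop i)).mp le_rfl
  have := h.2.1
  simp only [List.length_drop] at this
  simpa [zf] using this

-- elementwise consequence of m ≤ zf l t : l[j]? = l[t+j]? for j < m
theorem zf_ge_getElem? (l : List Char) (t m j : Nat) (h : m ≤ zf l t) (hj : j < m) :
    l[j]? = l[t + j]? := by
  have hiff := (lcp_ge_iff m l (l.drop t)).mp h
  have htake : l.take m = (l.drop t).take m := hiff.2.2
  have h1 : (l.take m)[j]? = l[j]? := by
    rw [List.getElem?_take]; simp [hj]
  have h2 : ((l.drop t).take m)[j]? = l[t + j]? := by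
    rw [List.getElem?_take]; simp [hj, List.getElem?_drop]
  rw [← h1, htake, h2]

-- converse: agreement on the first m positions gives m ≤ zf
theorem zf_ge_of_getElem? (l : List Char) (t m : Nat) (hm1 : m ≤ l.length)
    (hm2 : m ≤ l.length - t) (h : ∀ j, j < m → l[j]? = l[t + j]?) : m ≤ zf l t := by
  apply (lcp_ge_iff m l (l.drop t)).mpr
  refine ⟨hm1, by simp only [List.length_drop]; omega, ?_⟩
  apply List.ext_getElem?
  intro j
  rw [List.getElem?_take, List.getElem?_take]
  by_cases hj : j < m
  · simp [hj, List.getElem?_drop, h j hj]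
  · simp [hj]

-- equality of option-valued cells transfers to getD for in-range indices
theorem getD_eq_of_getElem? (l : List Char) (a b : Nat)
    (h : l[a]? = l[b]?) : l.getD a ' ' = l.getD b ' ' := by
  rw [List.getD_eq_getElem?_getD, List.getD_eq_getElem?_getD, h]

-- the while loop computes the true Z value whenever its start value is a lower bound
theorem zExtend_eq (l : List Char) (i : Nat) (hi : 1 ≤ i) :
    ∀ z, z ≤ zf l i → zExtend l i z = zf l i := by
  intro z
  induction z using zExtend.induct l i with
  | case1 z h ih =>
    intro hz
    rw [zExtend, dif_pos h]
    apply ih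
    apply zf_ge_of_getElem? l i (z + 1) (by omega) (by omega)
    intro j hj
    rcases Nat.lt_or_ge j z with hjz | hjz
    · exact zf_ge_getElem? l i z j hz hjz
    · have hjz' : j = z := by omega
      subst hjz'
      have hzn : j < l.length := by omega
      have hizn : i + j < l.length := h.1
      have h2 := h.2
      rw [List.getD_eq_getElem?_getD, List.getD_eq_getElem?_getD,
        List.getElem?_eq_getElem hzn, List.getElem?_eq_getElem hizn] at h2
      simp only [Option.getD_some] at h2
      rw [List.getElem?_eq_getElem hzn, List.getElem?_eq_getElem hizn, h2]
  | case2 z h =>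
    intro hz
    rw [zExtend, dif_neg h]
    by_contra hne
    have hlt : z + 1 ≤ zf l i := by omega
    have hle := zf_le l i
    have h1 : i + z < l.length := by omega
    have h2 : z < l.length := by omega
    have := zf_ge_getElem? l i (z + 1) z hlt (by omega)
    exact h ⟨h1, getD_eq_of_getElem? l z (i + z) this⟩

-- window / computed-prefix invariant of the z_array loop; state = (Z, L, R), next index i
def ZInv (l : List Char) (i : Nat) (st : List Nat × Nat × Nat) : Prop :=
  st.1.length = l.length ∧
  (∀ j, 1 ≤ j → j < i → st.1.getD j 0 = zf l j) ∧
  (∀ j, i ≤ j → st.1.getD j 0 = 0) ∧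
  st.2.1 < i ∧
  (st.2.1 = 0 → st.2.2 = 0) ∧
  (1 ≤ st.2.1 → st.2.1 ≤ st.2.2 → st.2.2 - st.2.1 + 1 ≤ zf l st.2.1)

theorem mirror_le (l : List Char) (L i R : Nat) (hL : 1 ≤ L) (hLi : L < i) (hiR : i ≤ R)
    (hwin : R - L + 1 ≤ zf l L) : min (R - i + 1) (zf l (i - L)) ≤ zf l i := by
  have hzfL := zf_le l L
  have hRn : R + 1 ≤ l.length := by omega
  apply zf_ge_of_getElem? l i _ (by omega) (by omega)
  intro j hj
  have e1 : l[j]? = l[(i - L) + j]? :=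
    zf_ge_getElem? l (i - L) _ j (Nat.min_le_right _ _) hj
  have e2 : l[(i - L) + j]? = l[L + ((i - L) + j)]? :=
    zf_ge_getElem? l L (R - L + 1) _ hwin (by omega)
  have e3 : L + ((i - L) + j) = i + j := by omega
  rw [e1, e2, e3]

theorem getD_set_self (Z : List Nat) (i z : Nat) (h : i < Z.length) :
    (Z.set i z).getD i 0 = z := by
  rw [List.getD_eq_getElem?_getD, List.getElem?_set]
  simp [h]

theorem getD_set_ne (Z : List Nat) (i j z : Nat) (h : i ≠ j) :
    (Z.set i z).getD j 0 = Z.getD j 0 := by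
  rw [List.getD_eq_getElem?_getD, List.getElem?_set, if_neg h, ← List.getD_eq_getElem?_getD]

theorem zStep_inv (l : List Char) (i : Nat) (st : List Nat × Nat × Nat)
    (hi : 1 ≤ i) (hin : i < l.length) (h : ZInv l i st) : ZInv l (i + 1) (zStep l st i) := by
  obtain ⟨Z, L, R⟩ := st
  obtain ⟨hlen, hcomp, hzero, hLi, hL0, hwin⟩ := h
  simp only at hlen hcomp hzero hLi hL0 hwin
  have hz0 : (if i ≤ R then min (R - i + 1) (Z.getD (i - L) 0) else Z.getD i 0) ≤ zf l i := by
    by_cases hiR : i ≤ R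
    · have hL1 : 1 ≤ L := by
        by_contra hc
        have h0 : L = 0 := by omega
        have := hL0 h0
        omega
      have hZm : Z.getD (i - L) 0 = zf l (i - L) := hcomp _ (by omega) (by omega)
      rw [if_pos hiR, hZm]
      exact mirror_le l L i R hL1 hLi hiR (hwin hL1 (by omega))
    · rw [if_neg hiR, hzero i le_rfl]
      exact Nat.zero_le _
  have hzeq : zExtend l i (if i ≤ R then min (R - i + 1) (Z.getD (i - L) 0) else Z.getD i 0)
      = zf l i := zExtend_eq l i hi _ hz0
  have hcomp' : ∀ j, 1 ≤ j → j < i + 1 → (Z.set i (zf l i)).getD j 0 = zf l j := by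
    intro j h1 h2
    rcases Nat.lt_or_ge j i with hji | hji
    · rw [getD_set_ne Z i j _ (by omega)]; exact hcomp j h1 hji
    · have hj : j = i := by omega
      subst hj
      exact getD_set_self Z j _ (by omega)
  have hzero' : ∀ j, i + 1 ≤ j → (Z.set i (zf l i)).getD j 0 = 0 := by
    intro j hj
    rw [getD_set_ne Z i j _ (by omega)]
    exact hzero j (by omega)
  simp only [zStep, hzeq]
  split_ifs with hgt
  · refine ⟨by simp [hlen], hcomp', hzero', Nat.lt_succ_self i, ?_, ?_⟩
    · intro h0
      exact absurd h0 (by omega : ¬ i = 0)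
    · intro _ h2
      have h2' : i ≤ i + zf l i - 1 := h2
      show i + zf l i - 1 - i + 1 ≤ zf l i
      omega
  · refine ⟨by simp [hlen], hcomp', hzero', ?_, hL0, hwin⟩
    show L < i + 1
    omega

theorem zFold_inv (l : List Char) : ∀ (cnt i : Nat) (st : List Nat × Nat × Nat),
    1 ≤ i → i + cnt ≤ l.length → ZInv l i st →
    ZInv l (i + cnt) ((List.range' i cnt).foldl (zStep l) st) := by
  intro cnt
  induction cnt with
  | zero => intro i st _ _ h; simpa using h
  | succ c ih =>
    intro i st hi hle h
    rw [List.range'_succ, List.foldl_cons]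
    have h1 := zStep_inv l i st hi (by omega) h
    have h2 := ih (i + 1) (zStep l st i) (by omega) (by omega) h1
    have harith : i + 1 + c = i + (c + 1) := by omega
    rwa [harith] at h2

theorem zFold_facts (l : List Char) (hl : 1 ≤ l.length) :
    ZInv l l.length
      ((List.range' 1 (l.length - 1)).foldl (zStep l) (List.replicate l.length 0, 0, 0)) := by
  have base : ZInv l 1 (List.replicate l.length 0, 0, 0) := by
    refine ⟨by simp, ?_, ?_, Nat.zero_lt_one, fun _ => rfl, ?_⟩
    · intro j h1 h2; omega
    · intro j _; simp
    · intro hL; exact absurd hL (by norm_num)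
  have h := zFold_inv l (l.length - 1) 1 _ le_rfl (by omega) base
  have harith : 1 + (l.length - 1) = l.length := by omega
  rwa [harith] at h

theorem powList_length (t : List Char) : ∀ k, (powList t k).length = k * t.length := by
  intro k
  induction k with
  | zero => simp [powList]
  | succ k ih =>
    show (t ++ powList t k).length = (k + 1) * t.length
    simp only [List.length_append, ih]
    ring

-- prefix-power reconstruction from periodicity
theorem period_pow : ∀ (k : Nat) (p : Nat) (l : List Char), 1 ≤ p → l.length = k * p →
    l.drop p = l.take (l.length - p) → powList (l.take p) k = l := by
  intro k
  induction k with
  | zero =>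
    intro p l _ hlen _
    have hnil : l = [] := List.length_eq_zero_iff.mp (by omega)
    subst hnil; rfl
  | succ k ih =>
    intro p l hp hlen hper
    rcases Nat.eq_zero_or_pos k with hk | hk
    · subst hk
      have htake : l.take p = l := List.take_of_length_le (by omega)
      show l.take p ++ powList (l.take p) 0 = l
      rw [htake]; simp [powList]
    · have hmul : (k + 1) * p = k * p + p := by ring
      have hl' : (l.drop p).length = k * p := by
        simp only [List.length_drop]; omega
      have hper' : (l.drop p).drop p = (l.drop p).take ((l.drop p).length - p) := by
        calc (l.drop p).drop p = (l.take (l.length - p)).drop p := by rw [← hper]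
          _ = (l.drop p).take (l.length - p - p) := by rw [List.drop_take]
          _ = (l.drop p).take ((l.drop p).length - p) := by
                simp only [List.length_drop]
      have htp : (l.drop p).take p = l.take p := by
        rw [hper, List.take_take]
        congr 1
        have hpk : p ≤ k * p := Nat.le_mul_of_pos_left p hk
        omega
      have hIH := ih p (l.drop p) hp hl' hper'
      rw [htp] at hIH
      show l.take p ++ powList (l.take p) k = l
      rw [hIH]
      exact List.take_append_drop p l

theorem pow_take (t : List Char) : ∀ k, (powList t (k + 1)).take (k * t.length) = powList t k := by
  intro k
  induction k with
  | zero => simp [powList]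
  | succ k ih =>
    show (t ++ powList t (k + 1)).take ((k + 1) * t.length) = powList t (k + 1)
    have hlen : (k + 1) * t.length = t.length + k * t.length := by ring
    rw [hlen, List.take_append]
    have h1 : t.take (t.length + k * t.length) = t := List.take_of_length_le (by omega)
    have h2 : t.length + k * t.length - t.length = k * t.length := by omega
    rw [h1, h2, ih]
    rfl

theorem pow_to_per (l : List Char) (p : Nat) (hp : 1 ≤ p) (hpn : p < l.length)
    (hmod : l.length % p = 0) (hpow : powList (l.take p) (l.length / p) = l) :
    l.drop p = l.take (l.length - p) := by
  have hdvd : p ∣ l.length := Nat.dvd_of_mod_eq_zero hmod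
  have hk : l.length / p * p = l.length := Nat.div_mul_cancel hdvd
  have hkpos : 1 ≤ l.length / p := by
    rcases Nat.eq_zero_or_pos (l.length / p) with h0 | h0
    · rw [h0] at hk; omega
    · exact h0
  obtain ⟨k', hk'⟩ : ∃ k', l.length / p = k' + 1 := ⟨l.length / p - 1, by omega⟩
  set t := l.take p with ht
  have htl : t.length = p := by
    rw [ht]; simp only [List.length_take]; omega
  have e1 : l.drop p = powList t k' := by
    conv_lhs => rw [← hpow, hk']
    show (t ++ powList t k').drop p = powList t k'
    rw [← htl, List.drop_left]
  have e2 : l.take (l.length - p) = powList t k' := by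
    conv_lhs => rw [← hpow, hk']
    have hlen2 : (powList t (k' + 1)).length - p = k' * t.length := by
      rw [powList_length, htl]
      have hm : (k' + 1) * p = k' * p + p := by ring
      omega
    rw [hlen2, pow_take]
  rw [e1, e2]

-- main characterisation: for 1 ≤ p < n with p ∣ n,  n - p ≤ zf l p ↔ the prefix power rebuilds l
theorem cond_iff (l : List Char) (p : Nat) (hp : 1 ≤ p) (hpn : p < l.length)
    (hmod : l.length % p = 0) :
    (l.length - p ≤ zf l p ↔ powList (l.take p) (l.length / p) = l) := by
  constructor
  · intro h
    have hdvd : p ∣ l.length := Nat.dvd_of_mod_eq_zero hmod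
    have hk : l.length / p * p = l.length := Nat.div_mul_cancel hdvd
    apply period_pow (l.length / p) p l hp (by omega)
    have hiff := (lcp_ge_iff (l.length - p) l (l.drop p)).mp h
    have htk : (l.drop p).take (l.length - p) = l.drop p :=
      List.take_of_length_le (by simp)
    exact htk.symm.trans hiff.2.2.symm
  · intro h
    have hper := pow_to_per l p hp hpn hmod h
    show l.length - p ≤ lcpLen l (l.drop p)
    apply (lcp_ge_iff _ l (l.drop p)).mpr
    refine ⟨by omega, by simp, ?_⟩
    rw [show (l.drop p).take (l.length - p) = l.drop p from
      List.take_of_length_le (by simp)]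
    exact hper.symm

-- 'if cond: out.append(f p)' fold = filter-then-map
theorem foldl_append_if_prop (xs : List Nat) (c : Nat → Prop) [DecidablePred c] (f : Nat → Int) :
    ∀ acc, xs.foldl (fun a p => if c p then a ++ [f p] else a) acc
      = acc ++ (xs.filter (fun p => decide (c p))).map f := by
  induction xs with
  | nil => intro acc; simp
  | cons x xs ih =>
    intro acc
    rw [List.foldl_cons, ih, List.filter_cons]
    by_cases hc : c x
    · simp [hc]
    · simp [hc]

theorem zArrayA_getD (s : String) (p : Nat) (hn : ¬ s.toList.length = 0)
    (hp1 : 1 ≤ p) (hpn : p < s.toList.length) :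
    (zArrayA s).getD p 0 = Int.ofNat (zf s.toList p) := by
  have hfacts := zFold_facts s.toList (by omega)
  simp only [zArrayA, if_neg hn]
  set st := (List.range' 1 (s.toList.length - 1)).foldl (zStep s.toList)
    (List.replicate s.toList.length 0, 0, 0) with hst
  have hZlen : st.1.length = s.toList.length := hfacts.1
  have hZp : st.1.getD p 0 = zf s.toList p := hfacts.2.1 p hp1 hpn
  have hlt : p < st.1.length := by omega
  rw [List.getD_eq_getElem?_getD, List.getElem?_map, List.getElem?_set,
    if_neg (by omega : ¬ (0 : Nat) = p), List.getElem?_eq_getElem hlt]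
  simp only [Option.map_some, Option.getD_some]
  have hgd : st.1[p]'hlt = st.1.getD p 0 := by
    rw [List.getD_eq_getElem?_getD, List.getElem?_eq_getElem hlt, Option.getD_some]
  rw [hgd, hZp]

-- ===== VERDICT (by name: the statement is the Claim_ definition above) =====
theorem string_periods_spec : Claim_equal_string_periods := by
  unfold Claim_equal_string_periods
  intro s _
  unfold Spec_string_periods
  simp only [string_periods, string_periods_alt]
  by_cases hn : s.toList.length = 0
  · simp [hn]
  · rw [if_neg hn]
    rw [foldl_append_if_prop (List.range' 1 (s.toList.length - 1))
      (fun p => s.toList.length % p = 0 ∧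
        (s.toList.length : Int) - (p : Int) ≤ (zArrayA s).getD p 0)
      (fun p => Int.ofNat p) []]
    rw [List.nil_append]
    apply congrArg
    apply List.filter_congr
    intro p hp
    have hmem := List.mem_range'_1.mp hp
    have hp1 : 1 ≤ p := hmem.1
    have hpn : p < s.toList.length := by
      have := hmem.2; omega
    have hA := zArrayA_getD s p hn hp1 hpn
    rw [Bool.eq_iff_iff]
    simp only [decide_eq_true_eq, Bool.and_eq_true, beq_iff_eq]
    rw [hA, show Int.ofNat (zf s.toList p) = ((zf s.toList p : Nat) : Int) from rfl]
    constructor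
    · rintro ⟨h1, h2⟩
      exact ⟨h1, (cond_iff s.toList p hp1 hpn h1).mp (by omega)⟩
    · rintro ⟨h1, h2⟩
      refine ⟨h1, ?_⟩
      have := (cond_iff s.toList p hp1 hpn h1).mpr h2
      omega
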